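-- pv_equiv track=rewrite | github.com/tkmonson/dsa-library | problems/count_triplets.py | trip_n3
-- ===== SOURCE A (Python) =====
-- def trip_n3(d, t):
--     d.sort()
--     n = len(d)
--     count = 0
--     for i in range(n - 2):
--         for j in range(i + 1, n - 1):
--             for k in range(j + 1, n):
--                 if d[i] + d[j] + d[k] <= t:
--                     count += 1
--     return count
-- ===== SOURCE B (Python) =====
-- def trip_n3(d, t):
--     d.sort()
--     n = len(d)
--     count = 0
--     for i in range(n):
--         lim = t - d[i]
--         lo, hi = i + 1, n - 1
--         while lo < hi:
--             if d[lo] + d[hi] <= lim: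
--                 count += hi - lo
--                 lo += 1
--             else:
--                 hi -= 1
--     return count
-- ===== Notes on version B (the rewrite author's own statement) =====
-- stated objective: faster
-- what changed: A's cubic triple nested index loop is replaced by sort + a two-pointer sweep per fixed first element, counting all (j,k) pairs with d[j]+d[k] <= t-d[i] in linear time per i.
import Mathlib
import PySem

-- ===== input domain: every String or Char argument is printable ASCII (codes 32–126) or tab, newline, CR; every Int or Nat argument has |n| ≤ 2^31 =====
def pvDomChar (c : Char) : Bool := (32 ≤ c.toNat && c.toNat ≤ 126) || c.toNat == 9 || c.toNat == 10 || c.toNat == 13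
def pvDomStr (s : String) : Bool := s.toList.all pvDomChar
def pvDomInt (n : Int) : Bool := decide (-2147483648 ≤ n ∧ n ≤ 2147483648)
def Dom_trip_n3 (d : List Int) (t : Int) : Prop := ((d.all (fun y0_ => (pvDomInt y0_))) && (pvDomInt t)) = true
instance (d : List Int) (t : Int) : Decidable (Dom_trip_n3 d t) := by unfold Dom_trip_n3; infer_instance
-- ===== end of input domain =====

-- B replaces A's cubic triple loop by sort + two pointers per fixed first element (O(n^2));
-- both versions sort d in place, so the side effect is identical and the claim is about the return value.

-- ===== PORT A =====
def trip_n3 (d : List Int) (t : Int) : Int :=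
  let s := PySem.List.sorted d (fun x => x) false
  let n : Int := s.length
  (PySem.List.pyRange 0 (n - 2) 1).foldl (fun count i =>
    (PySem.List.pyRange (i + 1) (n - 1) 1).foldl (fun count j =>
      (PySem.List.pyRange (j + 1) n 1).foldl (fun count k =>
        if PySem.List.pyGetD s i 0 + PySem.List.pyGetD s j 0 + PySem.List.pyGetD s k 0 ≤ t
        then count + 1 else count) count) count) 0

-- ===== PORT B =====
-- the 'while lo < hi' loop of Source B, recursion on hi - lo
def twoPtr (s : List Int) (lim : Int) (lo hi : Int) (count : Int) : Int :=
  if _h : lo < hi then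
    if PySem.List.pyGetD s lo 0 + PySem.List.pyGetD s hi 0 ≤ lim then
      twoPtr s lim (lo + 1) hi (count + (hi - lo))
    else
      twoPtr s lim lo (hi - 1) count
  else count
termination_by (hi - lo).toNat
decreasing_by all_goals omega

def trip_n3_alt (d : List Int) (t : Int) : Int :=
  let s := PySem.List.sorted d (fun x => x) false
  let n : Int := s.length
  (PySem.List.pyRange 0 n 1).foldl (fun count i =>
    twoPtr s (t - PySem.List.pyGetD s i 0) (i + 1) (n - 1) count) 0

-- ===== PRECONDITION & SPEC =====
def Spec_trip_n3 (d : List Int) (t : Int) (out : Int) : Prop := out = trip_n3_alt d t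
instance (d : List Int) (t : Int) (out : Int) : Decidable (Spec_trip_n3 d t out) := by unfold Spec_trip_n3; infer_instance

-- ===== CLAIM (what is proved, stated in full; the proofs are below) =====
def Claim_equal_trip_n3 : Prop := ∀ (d : List Int) (t : Int), Dom_trip_n3 d t → Spec_trip_n3 d t (trip_n3 d t)

-- ===== LEMMAS AND PROOFS =====

-- #{(p,q) | lo ≤ p < q ≤ hi, s[p]+s[q] ≤ lim}, expressed over pyRange lists
def pairCnt (s : List Int) (lim lo hi : Int) : Int :=
  ((PySem.List.pyRange lo hi 1).map (fun p =>
    ((PySem.List.pyRange (p + 1) (hi + 1) 1).countP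
      (fun q => decide (PySem.List.pyGetD s p 0 + PySem.List.pyGetD s q 0 ≤ lim)) : Int))).sum

lemma sorted_mono (s : List Int) (hs : s.Pairwise (· ≤ ·)) (a b : Int)
    (ha : 0 ≤ a) (hab : a ≤ b) (hb : b < (s.length : Int)) :
    PySem.List.pyGetD s a 0 ≤ PySem.List.pyGetD s b 0 := by
  rcases eq_or_lt_of_le hab with rfl | hlt
  · exact le_refl _
  · rw [PySem.List.pyGetD_eq_getElem s 0 ha (by omega),
        PySem.List.pyGetD_eq_getElem s 0 (show (0:Int) ≤ b by omega) (by omega)]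
    exact List.pairwise_iff_getElem.mp hs a.toNat b.toNat (by omega) (by omega) (by omega)

lemma pairCnt_zero (s : List Int) (lim lo hi : Int) (h : hi ≤ lo) :
    pairCnt s lim lo hi = 0 := by
  unfold pairCnt
  rw [PySem.List.pyRange_one_eq_nil h]
  simp

lemma twoPtr_eq (s : List Int) (hs : s.Pairwise (· ≤ ·)) (lim lo hi count : Int)
    (hlo : 0 ≤ lo) (hhi : hi < (s.length : Int)) :
    twoPtr s lim lo hi count = count + pairCnt s lim lo hi := by
  by_cases h : lo < hi
  · by_cases hle : PySem.List.pyGetD s lo 0 + PySem.List.pyGetD s hi 0 ≤ lim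
    · rw [twoPtr, dif_pos h, if_pos hle,
        twoPtr_eq s hs lim (lo + 1) hi (count + (hi - lo)) (by omega) hhi]
      have hfull : (PySem.List.pyRange (lo + 1) (hi + 1) 1).countP
          (fun q => decide (PySem.List.pyGetD s lo 0 + PySem.List.pyGetD s q 0 ≤ lim))
          = (PySem.List.pyRange (lo + 1) (hi + 1) 1).length := by
        apply List.countP_eq_length.mpr
        intro q hq
        rw [PySem.List.mem_pyRange_one] at hq
        have hq' : PySem.List.pyGetD s q 0 ≤ PySem.List.pyGetD s hi 0 :=
          sorted_mono s hs q hi (by omega) (by omega) hhi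
        simp only [decide_eq_true_eq]
        omega
      have hcons : pairCnt s lim lo hi = (hi - lo) + pairCnt s lim (lo + 1) hi := by
        unfold pairCnt
        rw [PySem.List.pyRange_one_cons h, List.map_cons, List.sum_cons, hfull,
          PySem.List.length_pyRange_one]
        rw [show (((hi + 1) - (lo + 1)).toNat : Int) = hi - lo by omega]
      rw [hcons]; ring
    · rw [twoPtr, dif_pos h, if_neg hle,
        twoPtr_eq s hs lim lo (hi - 1) count hlo (by omega)]
      congr 1
      unfold pairCnt
      have hsplit : PySem.List.pyRange lo hi 1
          = PySem.List.pyRange lo (hi - 1) 1 ++ [hi - 1] := by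
        have h' := PySem.List.pyRange_one_succ_right (a := lo) (b := hi - 1) (by omega)
        rw [show (hi - 1) + 1 = hi by omega] at h'
        exact h'
      rw [hsplit, List.map_append, List.sum_append]
      have hmap : ∀ p ∈ PySem.List.pyRange lo (hi - 1) 1,
          ((PySem.List.pyRange (p + 1) (hi + 1) 1).countP
            (fun q => decide (PySem.List.pyGetD s p 0 + PySem.List.pyGetD s q 0 ≤ lim)) : Int)
          = ((PySem.List.pyRange (p + 1) ((hi - 1) + 1) 1).countP
            (fun q => decide (PySem.List.pyGetD s p 0 + PySem.List.pyGetD s q 0 ≤ lim)) : Int) := by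
        intro p hp
        rw [PySem.List.mem_pyRange_one] at hp
        have hbig : ¬ (PySem.List.pyGetD s p 0 + PySem.List.pyGetD s hi 0 ≤ lim) := by
          have : PySem.List.pyGetD s lo 0 ≤ PySem.List.pyGetD s p 0 :=
            sorted_mono s hs lo p hlo (by omega) (by omega)
          omega
        rw [show (hi - 1) + 1 = hi by omega,
            PySem.List.pyRange_one_succ_right (a := p + 1) (b := hi) (by omega),
            List.countP_append]
        simp [hbig]
      rw [List.map_congr_left hmap]
      have hbig2 : PySem.List.pyGetD s lo 0 ≤ PySem.List.pyGetD s (hi - 1) 0 :=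
        sorted_mono s hs lo (hi - 1) hlo (by omega) (by omega)
      simp
      omega
  · rw [twoPtr, dif_neg h, pairCnt_zero s lim lo hi (by omega)]
    ring
termination_by (hi - lo).toNat
decreasing_by all_goals omega

-- A's inner two loops for a fixed i equal pairCnt with lim = t - s[i]
lemma trip_n3_inner (s : List Int) (t i c : Int) :
    (PySem.List.pyRange (i + 1) ((s.length : Int) - 1) 1).foldl (fun count j =>
      (PySem.List.pyRange (j + 1) (s.length : Int) 1).foldl (fun count k =>
        if PySem.List.pyGetD s i 0 + PySem.List.pyGetD s j 0 + PySem.List.pyGetD s k 0 ≤ t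
        then count + 1 else count) count) c
    = c + pairCnt s (t - PySem.List.pyGetD s i 0) (i + 1) ((s.length : Int) - 1) := by
  simp only [PySem.List.foldl_ite_add_one]
  rw [PySem.List.foldl_add _ (fun j => ((PySem.List.pyRange (j + 1) (s.length : Int) 1).countP
      (fun k => decide (PySem.List.pyGetD s i 0 + PySem.List.pyGetD s j 0
        + PySem.List.pyGetD s k 0 ≤ t)) : Int)) c]
  unfold pairCnt
  have hmap : ∀ j ∈ PySem.List.pyRange (i + 1) ((s.length : Int) - 1) 1,
      ((PySem.List.pyRange (j + 1) (s.length : Int) 1).countP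
        (fun k => decide (PySem.List.pyGetD s i 0 + PySem.List.pyGetD s j 0
          + PySem.List.pyGetD s k 0 ≤ t)) : Int)
      = ((PySem.List.pyRange (j + 1) (((s.length : Int) - 1) + 1) 1).countP
        (fun q => decide (PySem.List.pyGetD s j 0 + PySem.List.pyGetD s q 0
          ≤ t - PySem.List.pyGetD s i 0)) : Int) := by
    intro j hj
    rw [show ((s.length : Int) - 1) + 1 = (s.length : Int) by omega]
    congr 1
    apply List.countP_congr
    intro q hq
    simp only [decide_eq_true_eq]
    omega
  rw [List.map_congr_left hmap]

-- ===== VERDICT (by name: the statement is the Claim_ definition above) =====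
theorem trip_n3_spec : Claim_equal_trip_n3 := by
  intro d t _
  unfold Spec_trip_n3
  simp only [trip_n3, trip_n3_alt]
  set s := PySem.List.sorted d (fun x => x) false with hsdef
  have hs : s.Pairwise (· ≤ ·) := PySem.List.sorted_pairwise d (fun x => x)
  set n : Int := (s.length : Int) with hn
  have hA : (PySem.List.pyRange 0 (n - 2) 1).foldl (fun count i =>
      (PySem.List.pyRange (i + 1) (n - 1) 1).foldl (fun count j =>
        (PySem.List.pyRange (j + 1) n 1).foldl (fun count k =>
          if PySem.List.pyGetD s i 0 + PySem.List.pyGetD s j 0 + PySem.List.pyGetD s k 0 ≤ t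
          then count + 1 else count) count) count) 0
      = ((PySem.List.pyRange 0 (n - 2) 1).map (fun i =>
          pairCnt s (t - PySem.List.pyGetD s i 0) (i + 1) (n - 1))).sum := by
    simp only [hn, trip_n3_inner]
    rw [PySem.List.foldl_add _ (fun i =>
      pairCnt s (t - PySem.List.pyGetD s i 0) (i + 1) ((s.length : Int) - 1)) 0, zero_add]
  have hB : (PySem.List.pyRange 0 n 1).foldl (fun count i =>
      twoPtr s (t - PySem.List.pyGetD s i 0) (i + 1) (n - 1) count) 0
      = ((PySem.List.pyRange 0 n 1).map (fun i =>
          pairCnt s (t - PySem.List.pyGetD s i 0) (i + 1) (n - 1))).sum := by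
    rw [PySem.List.foldl_congr_mem _ _ (fun count i =>
        count + pairCnt s (t - PySem.List.pyGetD s i 0) (i + 1) (n - 1)) 0
      (by
        intro acc i hi
        exact twoPtr_eq s hs _ (i + 1) (n - 1) acc (by
            rw [PySem.List.mem_pyRange_one] at hi; omega) (by rw [hn]; omega))]
    rw [PySem.List.foldl_add _ (fun i =>
      pairCnt s (t - PySem.List.pyGetD s i 0) (i + 1) (n - 1)) 0, zero_add]
  rw [hA, hB]
  by_cases h2 : 2 ≤ n
  · rw [PySem.List.pyRange_one_append 0 (n - 2) n (by omega) (by omega),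
      List.map_append, List.sum_append]
    have hz : (((PySem.List.pyRange (n - 2) n 1).map (fun i =>
        pairCnt s (t - PySem.List.pyGetD s i 0) (i + 1) (n - 1))).sum) = 0 := by
      apply List.sum_eq_zero
      intro x hx
      rw [List.mem_map] at hx
      obtain ⟨i, hi, rfl⟩ := hx
      rw [PySem.List.mem_pyRange_one] at hi
      exact pairCnt_zero s _ (i + 1) (n - 1) (by omega)
    rw [hz, add_zero]
  · rw [PySem.List.pyRange_one_eq_nil (show n - 2 ≤ 0 by omega)]
    symm
    apply List.sum_eq_zero
    intro x hx
    rw [List.mem_map] at hx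
    obtain ⟨i, hi, rfl⟩ := hx
    rw [PySem.List.mem_pyRange_one] at hi
    exact pairCnt_zero s _ (i + 1) (n - 1) (by omega)
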